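-- pv_equiv track=rewrite | github.com/mohammadsahal/pythonChess | ChessBoard.py | bishopValidMove
-- ===== SOURCE A (Python) =====
-- def bishopValidMove(cPos, dPos, color, pieces):
--     moves = []
--     k = None
--     x = ord(cPos[0])
--     y = ord(cPos[1])
--     while k is None and x > ord('a') and y > ord('0'):
--         x -= 1
--         y -= 1
--         if chr(x)+chr(y) in pieces.keys():
--             k = pieces[chr(x)+chr(y)]
--         else:
--             k = None
--         if k is None or k[0] != color:
--             moves.append(chr(x)+chr(y))
--     k = None
--     x = ord(cPos[0])
--     y = ord(cPos[1])
--     while k is None and x < ord('h') and y > ord('0'):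
--         x += 1
--         y -= 1
--         if chr(x)+chr(y) in pieces.keys():
--             k = pieces[chr(x)+chr(y)]
--         else:
--             k = None
--         if k is None or k[0] != color:
--             moves.append(chr(x)+chr(y))
--     k = None
--     x = ord(cPos[0])
--     y = ord(cPos[1])
--     while k is None and x > ord('a') and y < ord('8'):
--         x -= 1
--         y += 1
--         if chr(x)+chr(y) in pieces.keys():
--             k = pieces[chr(x)+chr(y)]
--         else:
--             k = None
--         if k is None or k[0] != color:
--             moves.append(chr(x)+chr(y))
--     k = None
--     x = ord(cPos[0])
--     y = ord(cPos[1])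
--     while k is None and x < ord('h') and y < ord('8'):
--         x += 1
--         y += 1
--         if chr(x)+chr(y) in pieces.keys():
--             k = pieces[chr(x)+chr(y)]
--         else:
--             k = None
--         if k is None or k[0] != color:
--             moves.append(chr(x)+chr(y))
--     if dPos in moves:
--         return True
--     else:
--         return False
-- ===== SOURCE B (Python) =====
-- def bishopValidMove(cPos, dPos, color, pieces):
--     # Walk the single diagonal from cPos toward dPos instead of generating all four rays.
--     if len(dPos) != 2:
--         return False
--     df = ord(dPos[0]) - ord(cPos[0])
--     dr = ord(dPos[1]) - ord(cPos[1])
--     if df == 0 or abs(df) != abs(dr):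
--         return False
--     sx = 1 if df > 0 else -1
--     sy = 1 if dr > 0 else -1
--     x = ord(cPos[0])
--     y = ord(cPos[1])
--     for _ in range(abs(df)):
--         if sx < 0 and x <= ord('a'):
--             return False
--         if sx > 0 and x >= ord('h'):
--             return False
--         if sy < 0 and y <= ord('0'):
--             return False
--         if sy > 0 and y >= ord('8'):
--             return False
--         x += sx
--         y += sy
--         sq = chr(x) + chr(y)
--         k = pieces.get(sq)
--         if sq == dPos:
--             return k is None or k[0] != color
--         if k is not None:
--             return False
--     return False
-- ===== Notes on version B (the rewrite author's own statement) =====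
-- stated objective: simpler
-- what changed: Instead of generating the full move lists of all four diagonal rays and testing dPos for membership, B first checks that dPos is a 2-char square strictly diagonal from cPos and then walks only the one ray toward dPos, returning early at the first blocker or bound (reproducing A's asymmetric bounds: files in 'a'..'h', ranks above '0' / below '8').
-- outside the precondition, e.g. on bishopValidMove('a1', 'b2', 'w', {'c3': 'wP', 'e5': ''}): A returns True, B returns True
import Mathlib
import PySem

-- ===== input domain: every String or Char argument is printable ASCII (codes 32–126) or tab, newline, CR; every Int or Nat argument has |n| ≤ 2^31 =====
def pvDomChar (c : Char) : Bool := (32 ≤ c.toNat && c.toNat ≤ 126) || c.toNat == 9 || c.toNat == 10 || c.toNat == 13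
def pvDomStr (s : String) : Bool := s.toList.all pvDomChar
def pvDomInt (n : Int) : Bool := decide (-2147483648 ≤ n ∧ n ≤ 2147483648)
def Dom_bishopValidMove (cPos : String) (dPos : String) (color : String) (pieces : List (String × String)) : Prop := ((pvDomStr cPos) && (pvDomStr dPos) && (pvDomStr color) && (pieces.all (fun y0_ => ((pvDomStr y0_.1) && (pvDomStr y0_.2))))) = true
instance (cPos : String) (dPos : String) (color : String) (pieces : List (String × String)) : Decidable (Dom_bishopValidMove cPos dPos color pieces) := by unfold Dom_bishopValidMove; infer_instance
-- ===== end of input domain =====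

-- B walks only the single diagonal ray from cPos toward dPos (early exit at the first
-- blocker / bound) instead of generating A's four full ray move lists; return values
-- agree on Pre_ (neither program mutates its arguments).

-- ===== PORT A =====
-- chr(x)+chr(y): both ords are nonnegative and < 0xd800 wherever the programs build squares
def pvMkSq (x y : Int) : String := String.ofList [Char.ofNat x.toNat, Char.ofNat y.toNat]

-- A's four while-loops are one loop in the four diagonal directions; this helper is that
-- loop, literally: while k is None and x,y inside the direction's bound, step one square,
-- look it up, append it if empty or enemy-colored, stop at any piece.
-- k[0] != color is ported as take-1 (exact: Pre_ keeps piece values nonempty).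
def pvRay (pieces : List (String × String)) (color : String) (right up : Bool) (x y : Int) : List String :=
  if (if right then x < 104 else 97 < x) ∧ (if up then y < 56 else 48 < y) then
    match List.lookup (pvMkSq (if right then x + 1 else x - 1) (if up then y + 1 else y - 1)) pieces with
    | none => pvMkSq (if right then x + 1 else x - 1) (if up then y + 1 else y - 1) ::
        pvRay pieces color right up (if right then x + 1 else x - 1) (if up then y + 1 else y - 1)
    | some k => if String.ofList (k.toList.take 1) ≠ color then
        [pvMkSq (if right then x + 1 else x - 1) (if up then y + 1 else y - 1)] else []
  else []
termination_by (if right then 104 - x else x - 97).toNat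
decreasing_by cases right <;> simp_all <;> omega

-- Python raises IndexError when cPos has fewer than 2 chars (excluded by Pre_): the port returns false there.
def bishopValidMove (cPos : String) (dPos : String) (color : String) (pieces : List (String × String)) : Bool :=
  match PySem.Str.pyGet? cPos 0, PySem.Str.pyGet? cPos 1 with
  | some c0, some c1 =>
    let x : Int := c0.toNat
    let y : Int := c1.toNat
    let moves := pvRay pieces color false false x y ++ pvRay pieces color true false x y
              ++ pvRay pieces color false true x y ++ pvRay pieces color true true x y
    decide (dPos ∈ moves)
  | _, _ => false

-- ===== PORT B =====
-- Source B's for-loop over range(abs(df)): bail out at A's asymmetric bounds, step, stop at a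
-- blocker; at dPos report empty-or-enemy.
-- B's chr(x)+chr(y) (own helper; B shares no definitions with port A)
def pvMkSqB (x y : Int) : String := String.ofList [Char.ofNat x.toNat, Char.ofNat y.toNat]

def pvWalk (pieces : List (String × String)) (color : String) (dPos : String) (sx sy : Int) : Int → Int → Nat → Bool
  | _, _, 0 => false
  | x, y, Nat.succ n =>
    if sx < 0 ∧ x ≤ 97 then false
    else if 0 < sx ∧ 104 ≤ x then false
    else if sy < 0 ∧ y ≤ 48 then false
    else if 0 < sy ∧ 56 ≤ y then false
    else
      match List.lookup (pvMkSqB (x + sx) (y + sy)) pieces with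
      | none => if pvMkSqB (x + sx) (y + sy) = dPos then true
                else pvWalk pieces color dPos sx sy (x + sx) (y + sy) n
      | some k => if pvMkSqB (x + sx) (y + sy) = dPos then
                    decide (String.ofList (k.toList.take 1) ≠ color)
                  else false

def bishopValidMove_alt (cPos : String) (dPos : String) (color : String) (pieces : List (String × String)) : Bool :=
  if PySem.Str.len dPos ≠ 2 then false
  else
    match PySem.Str.pyGet? cPos 0 with
    | none => false
    | some c0 =>
      match PySem.Str.pyGet? cPos 1 with
      | none => false
      | some c1 =>
        match PySem.Str.pyGet? dPos 0 with
        | none => false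
        | some d0 =>
          match PySem.Str.pyGet? dPos 1 with
          | none => false
          | some d1 =>
            let df : Int := (d0.toNat : Int) - (c0.toNat : Int)
            let dr : Int := (d1.toNat : Int) - (c1.toNat : Int)
            if df = 0 ∨ df.natAbs ≠ dr.natAbs then false
            else
              let sx : Int := if 0 < df then 1 else -1
              let sy : Int := if 0 < dr then 1 else -1
              pvWalk pieces color dPos sx sy (c0.toNat : Int) (c1.toNat : Int) df.natAbs

-- ===== PRECONDITION & SPEC =====
-- key k sits on a (nonzero) diagonal of cPos: only there can a piece be the first blocker
-- of one of A's rays (where A would evaluate k[0])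
def pvDiagKey (cPos : String) (k : String) : Bool :=
  match cPos.toList, k.toList with
  | c0 :: c1 :: _, [a, b] =>
    decide ((a.toNat : Int) - (c0.toNat : Int) ≠ 0 ∧
      ((a.toNat : Int) - (c0.toNat : Int)).natAbs = ((b.toNat : Int) - (c1.toNat : Int)).natAbs)
  | _, _ => false

-- Pre_ excludes inputs where Python A raises IndexError: cPos shorter than 2 chars
-- (cPos[1]), and — slightly more broadly, to keep a closed form — empty-string piece
-- values whose key lies on a diagonal of cPos (k[0] raises whenever such a piece is the
-- first blocker of a ray; diagonal empty-valued pieces that are blocked earlier or lie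
-- outside A's bounds are excluded with them, see the cite).
def Pre_bishopValidMove (cPos : String) (dPos : String) (color : String) (pieces : List (String × String)) : Prop :=
  2 ≤ cPos.toList.length ∧ ∀ p ∈ pieces, p.2 = "" → pvDiagKey cPos p.1 = false
instance (cPos : String) (dPos : String) (color : String) (pieces : List (String × String)) : Decidable (Pre_bishopValidMove cPos dPos color pieces) := by unfold Pre_bishopValidMove; infer_instance

def pvWitness_bishopValidMove : String × String × String × (List (String × String)) :=
  ("d4", "f6", "w", [("e5", "bP")])

def Spec_bishopValidMove (cPos : String) (dPos : String) (color : String) (pieces : List (String × String)) (out : Bool) : Prop := out = bishopValidMove_alt cPos dPos color pieces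
instance (cPos : String) (dPos : String) (color : String) (pieces : List (String × String)) (out : Bool) : Decidable (Spec_bishopValidMove cPos dPos color pieces out) := by unfold Spec_bishopValidMove; infer_instance

-- ===== CLAIM (what is proved, stated in full; the proofs are below) =====
def Claim_equal_bishopValidMove : Prop := ∀ (cPos : String) (dPos : String) (color : String) (pieces : List (String × String)), Dom_bishopValidMove cPos dPos color pieces → Pre_bishopValidMove cPos dPos color pieces → Spec_bishopValidMove cPos dPos color pieces (bishopValidMove cPos dPos color pieces)

-- ===== LEMMAS AND PROOFS =====

def pvDir (b : Bool) : Int := if b then 1 else -1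

lemma pvMkSqB_eq : pvMkSqB = pvMkSq := rfl

lemma pvChar_eq_iff (m : Nat) (h : m < 55296) (c : Char) : Char.ofNat m = c ↔ m = c.toNat := by
  constructor
  · rintro rfl
    simp [Char.ofNat, Char.ofNatAux, Nat.isValidChar, h, Char.toNat]
  · intro hm
    apply Char.ext
    apply UInt32.toNat_inj.mp
    show (Char.ofNat m).toNat = c.toNat
    rw [← hm]
    simp [Char.ofNat, Char.ofNatAux, Nat.isValidChar, h, Char.toNat]

lemma pvMkSq_eq_iff (x y : Int) (hx0 : 0 ≤ x) (hx : x < 55296) (hy0 : 0 ≤ y) (hy : y < 55296)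
    (d0 d1 : Char) :
    pvMkSq x y = String.ofList [d0, d1] ↔ (x = (d0.toNat : Int) ∧ y = (d1.toNat : Int)) := by
  simp only [pvMkSq, String.ofList_inj, List.cons.injEq, and_true]
  rw [pvChar_eq_iff x.toNat (by omega) d0, pvChar_eq_iff y.toNat (by omega) d1]
  omega

-- Every square A's ray loop appends lies i ≥ 1 diagonal steps from (x, y) in the loop's
-- direction, inside the loop's bound.
lemma pvRay_shape (pieces : List (String × String)) (color : String) (right up : Bool)
    (x y : Int) (sq : String) (h : sq ∈ pvRay pieces color right up x y) :
    ∃ i : Nat, 1 ≤ i ∧ sq = pvMkSq (x + pvDir right * i) (y + pvDir up * i) ∧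
      (if right then x + i ≤ 104 else 97 ≤ x - i) ∧
      (if up then y + i ≤ 56 else 48 ≤ y - i) := by
  fun_induction pvRay pieces color right up x y with
  | case1 x y hc hnone ih =>
    rcases List.mem_cons.mp h with rfl | hmem
    · refine ⟨1, le_refl 1, ?_, ?_, ?_⟩
      · cases right <;> cases up <;> simp_all [pvDir] <;>
          exact congrArg₂ pvMkSq (by ring) (by ring)
      · cases right <;> simp_all [pvDir] <;> omega
      · cases up <;> simp_all [pvDir] <;> omega
    · obtain ⟨i, hi1, hsq, hbx, hby⟩ := ih hmem
      refine ⟨i + 1, by omega, ?_, ?_, ?_⟩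
      · rw [hsq]; cases right <;> cases up <;> simp_all [pvDir] <;>
          exact congrArg₂ pvMkSq (by push_cast; ring) (by push_cast; ring)
      · cases right <;> simp_all [pvDir] <;> push_cast <;> push_cast at hbx <;> omega
      · cases up <;> simp_all [pvDir] <;> push_cast <;> push_cast at hby <;> omega
  | case2 x y hc k hk hcol =>
    rcases List.mem_singleton.mp h with rfl
    refine ⟨1, le_refl 1, ?_, ?_, ?_⟩
    · cases right <;> cases up <;> simp_all [pvDir] <;>
        exact congrArg₂ pvMkSq (by ring) (by ring)
    · cases right <;> simp_all [pvDir] <;> omega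
    · cases up <;> simp_all [pvDir] <;> omega
  | case3 x y hc k hk hcol => simp at h
  | case4 x y hc => simp at h

-- pvRay's one-step equation with the direction ifs folded into pvDir
lemma pvRay_step (pieces : List (String × String)) (color : String) (right up : Bool) (x y : Int) :
    pvRay pieces color right up x y =
      if (if right then x < 104 else 97 < x) ∧ (if up then y < 56 else 48 < y) then
        match List.lookup (pvMkSq (x + pvDir right) (y + pvDir up)) pieces with
        | none => pvMkSq (x + pvDir right) (y + pvDir up) ::
            pvRay pieces color right up (x + pvDir right) (y + pvDir up)
        | some k => if String.ofList (k.toList.take 1) ≠ color then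
            [pvMkSq (x + pvDir right) (y + pvDir up)] else []
      else [] := by
  rw [pvRay]
  cases right <;> cases up <;> simp [pvDir, sub_eq_add_neg]

-- pvWalk's one-step equation, with the guard cascade folded into pvRay's loop condition
lemma pvWalk_step (pieces : List (String × String)) (color : String) (dPos : String)
    (right up : Bool) (x y : Int) (n : Nat) :
    pvWalk pieces color dPos (pvDir right) (pvDir up) x y (n + 1) =
      if (if right then x < 104 else 97 < x) ∧ (if up then y < 56 else 48 < y) then
        match List.lookup (pvMkSq (x + pvDir right) (y + pvDir up)) pieces with
        | none => if pvMkSq (x + pvDir right) (y + pvDir up) = dPos then true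
                  else pvWalk pieces color dPos (pvDir right) (pvDir up) (x + pvDir right) (y + pvDir up) n
        | some k => if pvMkSq (x + pvDir right) (y + pvDir up) = dPos then
                      decide (String.ofList (k.toList.take 1) ≠ color)
                    else false
      else false := by
  cases right <;> cases up <;> simp [pvWalk, pvDir, pvMkSqB_eq] <;>
    simp only [Bool.and_assoc, ← decide_not, not_le]

-- B's walk over n+1 steps computes exactly membership of dPos in A's matching ray, when
-- dPos is the square n+1 diagonal steps away in that direction.
lemma pvWalk_eq_ray (pieces : List (String × String)) (color : String) (right up : Bool)
    (d0 d1 : Char) (hd0 : d0.toNat ≤ 126) (hd1 : d1.toNat ≤ 126) :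
    ∀ n : Nat, ∀ x y : Int, 0 ≤ x → x ≤ 126 → 0 ≤ y → y ≤ 126 →
      (d0.toNat : Int) = x + pvDir right * (n + 1) →
      (d1.toNat : Int) = y + pvDir up * (n + 1) →
      pvWalk pieces color (String.ofList [d0, d1]) (pvDir right) (pvDir up) x y (n + 1)
        = decide (String.ofList [d0, d1] ∈ pvRay pieces color right up x y) := by
  intro n
  induction n with
  | zero =>
    intro x y hx0 hx1 hy0 hy1 hdx hdy
    rw [pvWalk_step, pvRay_step]
    by_cases hc : (if right then x < 104 else 97 < x) ∧ (if up then y < 56 else 48 < y)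
    · obtain ⟨hcx, hcy⟩ := hc
      have hcc := And.intro hcx hcy
      rw [if_pos hcc, if_pos hcc]
      have hb1 : 0 ≤ x + pvDir right := by
        cases right <;> simp [pvDir] at hcx ⊢ <;> omega
      have hb2 : x + pvDir right < 55296 := by
        cases right <;> simp [pvDir] at hcx ⊢ <;> omega
      have hb3 : 0 ≤ y + pvDir up := by
        cases up <;> simp [pvDir] at hcy ⊢ <;> omega
      have hb4 : y + pvDir up < 55296 := by
        cases up <;> simp [pvDir] at hcy ⊢ <;> omega
      have hsq : pvMkSq (x + pvDir right) (y + pvDir up) = String.ofList [d0, d1] := by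
        rw [pvMkSq_eq_iff _ _ hb1 hb2 hb3 hb4]
        constructor
        · cases right <;> simp [pvDir] at hdx ⊢ <;> omega
        · cases up <;> simp [pvDir] at hdy ⊢ <;> omega
      cases hlk : List.lookup (pvMkSq (x + pvDir right) (y + pvDir up)) pieces with
      | none => dsimp only; simp [hsq]
      | some k => dsimp only; simp only [hsq]; split_ifs with hcol <;> simp_all
    · rw [if_neg hc, if_neg hc]; simp
  | succ m ih =>
    intro x y hx0 hx1 hy0 hy1 hdx hdy
    rw [pvWalk_step, pvRay_step]
    by_cases hc : (if right then x < 104 else 97 < x) ∧ (if up then y < 56 else 48 < y)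
    · obtain ⟨hcx, hcy⟩ := hc
      have hcc := And.intro hcx hcy
      rw [if_pos hcc, if_pos hcc]
      have hb1 : 0 ≤ x + pvDir right := by
        cases right <;> simp [pvDir] at hcx ⊢ <;> omega
      have hb2 : x + pvDir right < 55296 := by
        cases right <;> simp [pvDir] at hcx ⊢ <;> omega
      have hb3 : 0 ≤ y + pvDir up := by
        cases up <;> simp [pvDir] at hcy ⊢ <;> omega
      have hb4 : y + pvDir up < 55296 := by
        cases up <;> simp [pvDir] at hcy ⊢ <;> omega
      have hne : pvMkSq (x + pvDir right) (y + pvDir up) ≠ String.ofList [d0, d1] := by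
        intro hEq
        rw [pvMkSq_eq_iff _ _ hb1 hb2 hb3 hb4] at hEq
        obtain ⟨e1, e2⟩ := hEq
        cases right <;> simp [pvDir] at hdx e1 <;> push_cast at hdx <;> omega
      cases hlk : List.lookup (pvMkSq (x + pvDir right) (y + pvDir up)) pieces with
      | none =>
        dsimp only
        rw [if_neg hne]
        rw [ih (x + pvDir right) (y + pvDir up)
          hb1
          (by cases right <;> simp [pvDir] at hcx hdx ⊢ <;> push_cast at hdx <;> omega)
          hb3
          (by cases up <;> simp [pvDir] at hcy hdy ⊢ <;> push_cast at hdy <;> omega)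
          (by cases right <;> simp [pvDir] at hdx ⊢ <;> push_cast at hdx ⊢ <;> omega)
          (by cases up <;> simp [pvDir] at hdy ⊢ <;> push_cast at hdy ⊢ <;> omega)]
        simp [List.mem_cons, Ne.symm hne]
      | some k =>
        dsimp only
        rw [if_neg hne]
        split_ifs with hcol <;> simp [Ne.symm hne]
    · rw [if_neg hc, if_neg hc]; simp

-- consequence of pvRay_shape on the character codes of a 2-char member
lemma pvRay_mem_ords (pieces : List (String × String)) (color : String) (right up : Bool)
    (x y : Int) (hx0 : 0 ≤ x) (hx1 : x ≤ 126) (hy0 : 0 ≤ y) (hy1 : y ≤ 126) (d0 d1 : Char)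
    (h : String.ofList [d0, d1] ∈ pvRay pieces color right up x y) :
    ∃ i : Nat, 1 ≤ i ∧ (d0.toNat : Int) = x + pvDir right * i ∧ (d1.toNat : Int) = y + pvDir up * i := by
  obtain ⟨i, hi1, hsq, hbx, hby⟩ := pvRay_shape pieces color right up x y _ h
  rw [eq_comm, pvMkSq_eq_iff] at hsq
  · exact ⟨i, hi1, hsq.1.symm, hsq.2.symm⟩
  · cases right <;> simp [pvDir] at hbx ⊢ <;> push_cast at hbx <;> omega
  · cases right <;> simp [pvDir] at hbx ⊢ <;> push_cast at hbx <;> omega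
  · cases up <;> simp [pvDir] at hby ⊢ <;> push_cast at hby <;> omega
  · cases up <;> simp [pvDir] at hby ⊢ <;> push_cast at hby <;> omega

-- every square in a ray is a 2-character string
lemma pvRay_mem_len (pieces : List (String × String)) (color : String) (right up : Bool)
    (x y : Int) (sq : String) (h : sq ∈ pvRay pieces color right up x y) :
    sq.toList.length = 2 := by
  obtain ⟨i, _, hsq, _, _⟩ := pvRay_shape pieces color right up x y _ h
  rw [hsq]
  simp [pvMkSq]

-- ===== VERDICT (by name: the statement is the Claim_ definition above) =====
theorem bishopValidMove_spec : Claim_equal_bishopValidMove := by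
  intro cPos dPos color pieces hDom hPre
  unfold Spec_bishopValidMove
  obtain ⟨hlen, -⟩ := hPre
  obtain ⟨lc, rfl⟩ : ∃ l, cPos = String.ofList l := ⟨cPos.toList, String.ofList_toList.symm⟩
  obtain ⟨ld, rfl⟩ : ∃ l, dPos = String.ofList l := ⟨dPos.toList, String.ofList_toList.symm⟩
  rw [String.toList_ofList] at hlen
  match lc, hlen with
  | c0 :: c1 :: rest, _ =>
  -- character bounds, from the input domain
  simp only [Dom_bishopValidMove, pvDomStr, pvDomChar, Bool.and_eq_true, List.all_eq_true,
    String.toList_ofList] at hDom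
  obtain ⟨⟨⟨hdc, hdd⟩, -⟩, -⟩ := hDom
  have hbd : ∀ (c : Char),
      (decide (32 ≤ c.toNat) && decide (c.toNat ≤ 126) || c.toNat == 9 || c.toNat == 10 ||
        c.toNat == 13) = true → c.toNat ≤ 126 := by
    intro c h
    simp only [Bool.or_eq_true, Bool.and_eq_true, decide_eq_true_eq, beq_iff_eq] at h
    rcases h with ((⟨-, h⟩ | h) | h) | h <;> omega
  have hc0 : c0.toNat ≤ 126 := hbd c0 (hdc c0 (by simp))
  have hc1 : c1.toNat ≤ 126 := hbd c1 (hdc c1 (by simp))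
  have g0 : PySem.Str.pyGet? (String.ofList (c0 :: c1 :: rest)) 0 = some c0 := by
    simp [PySem.Str.pyGet?, PySem.List.pyGet?_zero]
  have g1 : PySem.Str.pyGet? (String.ofList (c0 :: c1 :: rest)) 1 = some c1 := by
    simp [PySem.Str.pyGet?, PySem.List.pyGet?, PySem.List.pyIdx?]
  simp only [bishopValidMove, g0, g1]
  by_cases hL : ld.length = 2
  · -- dPos is a two-character string [d0, d1]
    obtain ⟨d0, d1, rfl⟩ : ∃ a b, ld = [a, b] := by
      match ld, hL with
      | [a, b], _ => exact ⟨a, b, rfl⟩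
    have hd0 : d0.toNat ≤ 126 := hbd d0 (hdd d0 (by simp))
    have hd1 : d1.toNat ≤ 126 := hbd d1 (hdd d1 (by simp))
    have gd0 : PySem.Str.pyGet? (String.ofList [d0, d1]) 0 = some d0 := by
      simp [PySem.Str.pyGet?, PySem.List.pyGet?_zero]
    have gd1 : PySem.Str.pyGet? (String.ofList [d0, d1]) 1 = some d1 := by
      simp [PySem.Str.pyGet?, PySem.List.pyGet?, PySem.List.pyIdx?]
    rw [bishopValidMove_alt, if_neg (by simp [PySem.Str.len])]
    simp only [g0, g1, gd0, gd1]
    -- the character-code displacements (B's df, dr)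
    have hx0 : (0 : Int) ≤ (c0.toNat : Int) := by positivity
    have hy0 : (0 : Int) ≤ (c1.toNat : Int) := by positivity
    have hx1 : (c0.toNat : Int) ≤ 126 := by exact_mod_cast hc0
    have hy1 : (c1.toNat : Int) ≤ 126 := by exact_mod_cast hc1
    have noway : ∀ (r p : Bool),
        String.ofList [d0, d1] ∈ pvRay pieces color r p (c0.toNat : Int) (c1.toNat : Int) →
        ∃ i : Nat, 1 ≤ i ∧ (d0.toNat : Int) = (c0.toNat : Int) + pvDir r * i ∧
          (d1.toNat : Int) = (c1.toNat : Int) + pvDir p * i := by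
      intro r p hm
      exact pvRay_mem_ords pieces color r p _ _ hx0 hx1 hy0 hy1 d0 d1 hm
    by_cases hdiag : ((d0.toNat : Int) - (c0.toNat : Int) = 0 ∨
        ((d0.toNat : Int) - (c0.toNat : Int)).natAbs ≠ ((d1.toNat : Int) - (c1.toNat : Int)).natAbs)
    · -- not a (nonzero) diagonal displacement: B returns false, and dPos is in no ray
      rw [if_pos hdiag]
      simp only [decide_eq_false_iff_not, List.mem_append]
      intro hOr
      rcases hOr with ((h | h) | h) | h <;>
        · obtain ⟨i, hi, e1, e2⟩ := noway _ _ h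
          simp [pvDir] at e1 e2
          omega
    · rw [if_neg hdiag]
      push_neg at hdiag
      obtain ⟨hdf, hab⟩ := hdiag
      have hnn : ((d0.toNat : Int) - (c0.toNat : Int)).natAbs
          = (((d0.toNat : Int) - (c0.toNat : Int)).natAbs - 1) + 1 := by omega
      by_cases hu : (0 : Int) < (d0.toNat : Int) - (c0.toNat : Int) <;>
        by_cases hv : (0 : Int) < (d1.toNat : Int) - (c1.toNat : Int)
      · -- up-right ray
        rw [if_pos hu, if_pos hv, hnn]
        have wlk := pvWalk_eq_ray pieces color true true d0 d1 hd0 hd1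
          (((d0.toNat : Int) - (c0.toNat : Int)).natAbs - 1) _ _ hx0 hx1 hy0 hy1
          (by simp [pvDir]; push_cast; omega) (by simp [pvDir]; push_cast; omega)
        simp only [pvDir] at wlk
        norm_num at wlk
        rw [wlk]
        have n1 : String.ofList [d0, d1] ∉ pvRay pieces color false false (c0.toNat : Int) (c1.toNat : Int) := by
          intro h; obtain ⟨i, hi, e1, e2⟩ := noway _ _ h; simp [pvDir] at e1 e2; omega
        have n2 : String.ofList [d0, d1] ∉ pvRay pieces color true false (c0.toNat : Int) (c1.toNat : Int) := by
          intro h; obtain ⟨i, hi, e1, e2⟩ := noway _ _ h; simp [pvDir] at e1 e2; omega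
        have n3 : String.ofList [d0, d1] ∉ pvRay pieces color false true (c0.toNat : Int) (c1.toNat : Int) := by
          intro h; obtain ⟨i, hi, e1, e2⟩ := noway _ _ h; simp [pvDir] at e1 e2; omega
        simp [List.mem_append, n1, n2, n3]
      · -- down-right ray
        rw [if_pos hu, if_neg hv, hnn]
        have wlk := pvWalk_eq_ray pieces color true false d0 d1 hd0 hd1
          (((d0.toNat : Int) - (c0.toNat : Int)).natAbs - 1) _ _ hx0 hx1 hy0 hy1
          (by simp [pvDir]; push_cast; omega) (by simp [pvDir]; push_cast; omega)
        simp only [pvDir] at wlk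
        norm_num at wlk
        rw [wlk]
        have n1 : String.ofList [d0, d1] ∉ pvRay pieces color false false (c0.toNat : Int) (c1.toNat : Int) := by
          intro h; obtain ⟨i, hi, e1, e2⟩ := noway _ _ h; simp [pvDir] at e1 e2; omega
        have n3 : String.ofList [d0, d1] ∉ pvRay pieces color false true (c0.toNat : Int) (c1.toNat : Int) := by
          intro h; obtain ⟨i, hi, e1, e2⟩ := noway _ _ h; simp [pvDir] at e1 e2; omega
        have n4 : String.ofList [d0, d1] ∉ pvRay pieces color true true (c0.toNat : Int) (c1.toNat : Int) := by
          intro h; obtain ⟨i, hi, e1, e2⟩ := noway _ _ h; simp [pvDir] at e1 e2; omega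
        simp [List.mem_append, n1, n3, n4]
      · -- up-left ray
        rw [if_neg hu, if_pos hv, hnn]
        have wlk := pvWalk_eq_ray pieces color false true d0 d1 hd0 hd1
          (((d0.toNat : Int) - (c0.toNat : Int)).natAbs - 1) _ _ hx0 hx1 hy0 hy1
          (by simp [pvDir]; push_cast; omega) (by simp [pvDir]; push_cast; omega)
        simp only [pvDir] at wlk
        norm_num at wlk
        rw [wlk]
        have n1 : String.ofList [d0, d1] ∉ pvRay pieces color false false (c0.toNat : Int) (c1.toNat : Int) := by
          intro h; obtain ⟨i, hi, e1, e2⟩ := noway _ _ h; simp [pvDir] at e1 e2; omega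
        have n2 : String.ofList [d0, d1] ∉ pvRay pieces color true false (c0.toNat : Int) (c1.toNat : Int) := by
          intro h; obtain ⟨i, hi, e1, e2⟩ := noway _ _ h; simp [pvDir] at e1 e2; omega
        have n4 : String.ofList [d0, d1] ∉ pvRay pieces color true true (c0.toNat : Int) (c1.toNat : Int) := by
          intro h; obtain ⟨i, hi, e1, e2⟩ := noway _ _ h; simp [pvDir] at e1 e2; omega
        simp [List.mem_append, n1, n2, n4]
      · -- down-left ray
        rw [if_neg hu, if_neg hv, hnn]
        have wlk := pvWalk_eq_ray pieces color false false d0 d1 hd0 hd1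
          (((d0.toNat : Int) - (c0.toNat : Int)).natAbs - 1) _ _ hx0 hx1 hy0 hy1
          (by simp [pvDir]; push_cast; omega) (by simp [pvDir]; push_cast; omega)
        simp only [pvDir] at wlk
        norm_num at wlk
        rw [wlk]
        have n2 : String.ofList [d0, d1] ∉ pvRay pieces color true false (c0.toNat : Int) (c1.toNat : Int) := by
          intro h; obtain ⟨i, hi, e1, e2⟩ := noway _ _ h; simp [pvDir] at e1 e2; omega
        have n3 : String.ofList [d0, d1] ∉ pvRay pieces color false true (c0.toNat : Int) (c1.toNat : Int) := by
          intro h; obtain ⟨i, hi, e1, e2⟩ := noway _ _ h; simp [pvDir] at e1 e2; omega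
        have n4 : String.ofList [d0, d1] ∉ pvRay pieces color true true (c0.toNat : Int) (c1.toNat : Int) := by
          intro h; obtain ⟨i, hi, e1, e2⟩ := noway _ _ h; simp [pvDir] at e1 e2; omega
        simp [List.mem_append, n2, n3, n4]
  · -- dPos is not a two-character string: B returns false, and every ray square has 2 chars
    rw [bishopValidMove_alt, if_pos (by simp [PySem.Str.len]; exact_mod_cast hL)]
    simp only [decide_eq_false_iff_not, List.mem_append]
    intro hOr
    rcases hOr with ((h | h) | h) | h <;>
      · have := pvRay_mem_len pieces color _ _ _ _ _ h
        rw [String.toList_ofList] at this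
        exact hL this
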